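-- pv_equiv track=rewrite | github.com/cybercuisine/TIL | programming/tessoku-python/src/tessoku_python/ans/ch10/a72.py | paint_row
-- ===== SOURCE A (Python) =====
-- def paint_row(H, W, d, remaining_steps):
--     column = [ ([ d[i][j] for i in range(H) ].count('.'), j) for j in range(W) ]
--     column.sort(reverse=True)
--     for j in range(remaining_steps):
--         idx = column[j][1]
--         for i in range(H):
--             d[i][idx] = "#"
--     return sum(map(lambda l: l.count("#"), d))
-- ===== SOURCE B (Python) =====
-- def paint_row(H, W, d, remaining_steps):
--     # Count once, per column, the '#' and '.' cells of the H x W grid; pick the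
--     # columns with the most '.' cells and add their gains arithmetically instead
--     # of painting and rescanning the whole grid.  Does not mutate d.
--     hash_col = [0] * W
--     dot_col = [0] * W
--     for row in d[:H]:
--         for j in range(W):
--             c = row[j]
--             if c == '.':
--                 dot_col[j] += 1
--             elif c == '#':
--                 hash_col[j] += 1
--     order = sorted(range(W), key=lambda j: (dot_col[j], j), reverse=True)
--     total = sum(row.count('#') for row in d)
--     gain = 0
--     for k in range(remaining_steps):
--         gain += H - hash_col[order[k]]
--     return total + gain
-- ===== Notes on version B (the rewrite author's own statement) =====
-- stated objective: alternative
-- what changed: B replaces A's in-place painting of the selected columns followed by a second full rescan of the grid with one counting pass (per-column '#' and '.' tallies plus the grid's total '#') and returns the answer arithmetically as total plus H minus each selected column's '#' count; B does not mutate d. Pre_ restricts to the natural domain (step count at most W, H non-negative whenever a column is painted, scanned rows at least W cells): A still returns on a negative H, where its range(H) loops are silently empty while B scans d[:H].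
-- outside the precondition, e.g. on paint_row(-1, 1, [['.'], ['.']], 1): A returns 0, B returns -1; on paint_row(-1, 2, [['.'], ['.', '#']], 0): A returns 1, B raises IndexError
import Mathlib
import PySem

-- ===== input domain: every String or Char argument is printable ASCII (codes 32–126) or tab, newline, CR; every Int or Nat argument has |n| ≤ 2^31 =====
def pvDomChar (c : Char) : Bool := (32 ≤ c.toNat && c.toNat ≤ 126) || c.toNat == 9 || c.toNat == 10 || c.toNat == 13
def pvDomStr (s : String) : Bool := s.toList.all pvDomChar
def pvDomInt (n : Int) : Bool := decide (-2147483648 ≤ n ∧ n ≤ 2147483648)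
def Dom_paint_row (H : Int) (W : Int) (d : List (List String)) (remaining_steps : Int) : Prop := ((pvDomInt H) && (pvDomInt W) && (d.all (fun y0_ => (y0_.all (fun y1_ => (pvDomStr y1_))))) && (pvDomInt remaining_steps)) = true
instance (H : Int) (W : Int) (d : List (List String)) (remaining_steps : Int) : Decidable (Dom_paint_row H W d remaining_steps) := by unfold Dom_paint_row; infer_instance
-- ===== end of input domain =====

-- B computes the same RETURN VALUE as A by one counting pass plus arithmetic instead of
-- A's in-place painting and second full rescan (objective: alternative decomposition);
-- the equivalence proved here is about the return value only (A mutates d, B does not).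

-- ===== PORT A =====
def paint_row (H : Int) (W : Int) (d : List (List String)) (remaining_steps : Int) : Int :=
  -- column = [ ([ d[i][j] for i in range(H) ].count('.'), j) for j in range(W) ]
  let column : List (Int × Int) :=
    (PySem.List.pyRange 0 W 1).map (fun j =>
      (((PySem.List.count ((PySem.List.pyRange 0 H 1).map (fun i =>
          PySem.List.pyGetD (PySem.List.pyGetD d i []) j "")) ".") : Int), j))
  -- column.sort(reverse=True)  (tuples compare lexicographically)
  let column := PySem.List.sorted2 column (fun p => p.1) (fun p => p.2) true
  -- for j in range(remaining_steps): idx = column[j][1]; for i in range(H): d[i][idx] = "#"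
  let d2 := (PySem.List.pyRange 0 remaining_steps 1).foldl (fun dd j =>
      let idx := (PySem.List.pyGetD column j ((0 : Int), (0 : Int))).2
      (PySem.List.pyRange 0 H 1).foldl (fun dd2 i =>
        PySem.List.pySetD dd2 i (PySem.List.pySetD (PySem.List.pyGetD dd2 i []) idx "#")) dd) d
  -- return sum(map(lambda l: l.count("#"), d))
  (d2.map (fun l => ((PySem.List.count l "#") : Int))).sum

-- ===== PORT B =====
def paint_row_alt (H : Int) (W : Int) (d : List (List String)) (remaining_steps : Int) : Int :=
  -- hash_col = [0]*W ; dot_col = [0]*W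
  -- for row in d[:H]: for j in range(W): tally '.' and '#' of column j
  let st : List Int × List Int :=
    (PySem.List.slice d none (some H)).foldl (fun (st : List Int × List Int) row =>
      (PySem.List.pyRange 0 W 1).foldl (fun (ar : List Int × List Int) j =>
        let c := PySem.List.pyGetD row j ""
        if c = "." then
          (ar.1, PySem.List.pySetD ar.2 j (PySem.List.pyGetD ar.2 j 0 + 1))
        else if c = "#" then
          (PySem.List.pySetD ar.1 j (PySem.List.pyGetD ar.1 j 0 + 1), ar.2)
        else ar) st)
      (PySem.List.pyRepeat [(0 : Int)] W, PySem.List.pyRepeat [(0 : Int)] W)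
  let hash_col := st.1
  let dot_col := st.2
  -- order = sorted(range(W), key=lambda j: (dot_col[j], j), reverse=True)
  let order := PySem.List.sorted2 (PySem.List.pyRange 0 W 1)
      (fun j => PySem.List.pyGetD dot_col j 0) (fun j => j) true
  -- total = sum(row.count('#') for row in d)
  let total := (d.map (fun row => ((PySem.List.count row "#") : Int))).sum
  -- gain = 0 ; for k in range(remaining_steps): gain += H - hash_col[order[k]]
  let gain := (PySem.List.pyRange 0 remaining_steps 1).foldl (fun g k =>
      g + (H - PySem.List.pyGetD hash_col (PySem.List.pyGetD order k 0) 0)) 0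
  -- return total + gain
  total + gain

-- ===== PRECONDITION & SPEC =====
-- Pre_ is the natural domain of the task: a step count of at most the number of columns W,
-- a height H that is non-negative whenever a column is actually painted, and rows of at
-- least W cells wherever a pass scans them — outside that A either raises IndexError (too
-- few rows/cells, too many steps), or returns a value on a negative H (no grid height at
-- all) only because its range(H) loops are silently empty while B's d[:H] scan reads the
-- grid (B raises on short rows there, and differs when columns are painted).
def Pre_paint_row (H : Int) (W : Int) (d : List (List String)) (remaining_steps : Int) : Prop :=
  (0 ≤ H ∨ (remaining_steps ≤ 0 ∧ (0 < W →
      ∀ row ∈ d.take (d.length - (min (-H).toNat d.length)), W ≤ (row.length : Int)))) ∧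
    remaining_steps ≤ max W 0 ∧
    (0 < H → 0 < W → (H ≤ (d.length : Int) ∧ ∀ row ∈ d.take H.toNat, W ≤ (row.length : Int)))
instance (H : Int) (W : Int) (d : List (List String)) (remaining_steps : Int) : Decidable (Pre_paint_row H W d remaining_steps) := by unfold Pre_paint_row; infer_instance

def pvWitness_paint_row : Int × Int × List (List String) × Int := (1, 2, [[".", "#"]], 1)

def Spec_paint_row (H : Int) (W : Int) (d : List (List String)) (remaining_steps : Int) (out : Int) : Prop := out = paint_row_alt H W d remaining_steps
instance (H : Int) (W : Int) (d : List (List String)) (remaining_steps : Int) (out : Int) : Decidable (Spec_paint_row H W d remaining_steps out) := by unfold Spec_paint_row; infer_instance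

-- ===== CLAIM (what is proved, stated in full; the proofs are below) =====
def Claim_equal_paint_row : Prop := ∀ (H : Int) (W : Int) (d : List (List String)) (remaining_steps : Int), Dom_paint_row H W d remaining_steps → Pre_paint_row H W d remaining_steps → Spec_paint_row H W d remaining_steps (paint_row H W d remaining_steps)

-- ===== LEMMAS AND PROOFS =====

-- '#'-count of a row (as an Int)
def pvCnt (l : List String) : Int := (PySem.List.count l "#" : Nat)

-- number of rows among `rows` whose j-th cell equals x (as an Int)
def pvColCnt (x : String) (rows : List (List String)) (j : Nat) : Int :=
  (rows.countP (fun row => decide (row.getD j "" = x)) : Nat)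

-- insertBy commutes with map
theorem pv_insertBy_map {α β : Type} (before : β → β → Bool) (f : α → β) (x : α) (ys : List α) :
    PySem.List.insertBy before (f x) (ys.map f)
      = (PySem.List.insertBy (fun a b => before (f a) (f b)) x ys).map f := by
  induction ys with
  | nil => simp [PySem.List.insertBy]
  | cons y ys ih =>
    simp only [List.map_cons, PySem.List.insertBy]
    by_cases h : before (f x) (f y)
    · simp [h]
    · simp [h, ih]

theorem pv_foldl_insertBy_map {α β : Type} (B : β → β → Bool) (f : α → β) :
    ∀ (xs : List α) (acc : List α),
      xs.foldl (fun a x => PySem.List.insertBy B (f x) a) (acc.map f)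
        = (xs.foldl (fun a x => PySem.List.insertBy (fun u v => B (f u) (f v)) x a) acc).map f := by
  intro xs
  induction xs with
  | nil => intro acc; rfl
  | cons x xs ih =>
    intro acc
    simp only [List.foldl_cons]
    rw [pv_insertBy_map, ih]

-- sorted2 commutes with map
theorem pv_sorted2_map {α β : Type} (k1 : β → Int) (k2 : β → Int) (f : α → β)
    (xs : List α) (rev : Bool) :
    PySem.List.sorted2 (xs.map f) k1 k2 rev
      = (PySem.List.sorted2 xs (fun a => k1 (f a)) (fun a => k2 (f a)) rev).map f := by
  unfold PySem.List.sorted2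
  cases rev <;>
  · simp only [List.foldl_map, if_true, if_false, Bool.false_eq_true]
    first
    | · have := pv_foldl_insertBy_map (f := f)
          (B := fun a b => (decide (k1 a < k1 b) || !decide (k1 b < k1 a) && decide (k2 a < k2 b)))
          xs []
        simp only [List.map_nil] at this ⊢
        exact this
    | · have := pv_foldl_insertBy_map (f := f)
          (B := fun b a => (decide (k1 a < k1 b) || !decide (k1 b < k1 a) && decide (k2 a < k2 b)))
          xs []
        simp only [List.map_nil] at this ⊢
        exact this

-- insertBy only compares against members
theorem pv_insertBy_congr {α : Type} (before before' : α → α → Bool) (x : α) (ys : List α)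
    (h : ∀ y ∈ ys, before x y = before' x y) :
    PySem.List.insertBy before x ys = PySem.List.insertBy before' x ys := by
  induction ys with
  | nil => rfl
  | cons y ys ih =>
    simp only [PySem.List.insertBy]
    rw [h y (by simp)]
    by_cases hb : before' x y
    · simp [hb]
    · simp only [hb, if_false, Bool.false_eq_true]
      rw [ih (fun z hz => h z (by simp [hz]))]

theorem pv_foldl_insertBy_congr {α : Type} (Q : α → Prop) (B B' : α → α → Bool)
    (hBB : ∀ a b, Q a → Q b → B a b = B' a b) :
    ∀ (xs : List α) (acc : List α), (∀ x ∈ xs, Q x) → (∀ y ∈ acc, Q y) →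
      xs.foldl (fun a x => PySem.List.insertBy B x a) acc
        = xs.foldl (fun a x => PySem.List.insertBy B' x a) acc := by
  intro xs
  induction xs with
  | nil => intro acc _ _; rfl
  | cons x xs ih =>
    intro acc hxs hacc
    simp only [List.foldl_cons]
    have hx : Q x := hxs x (by simp)
    rw [pv_insertBy_congr B B' x acc (fun y hy => hBB x y hx (hacc y hy))]
    exact ih _ (fun z hz => hxs z (by simp [hz]))
      (fun y hy => by
        rcases (PySem.List.insertBy_mem_iff _ _ _ _).1 hy with h | h
        · exact h ▸ hx
        · exact hacc y h)

-- sorted2 only looks at the keys of members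
theorem pv_sorted2_congr {α : Type} (k1 k1' k2 k2' : α → Int) (xs : List α) (rev : Bool)
    (h1 : ∀ x ∈ xs, k1 x = k1' x) (h2 : ∀ x ∈ xs, k2 x = k2' x) :
    PySem.List.sorted2 xs k1 k2 rev = PySem.List.sorted2 xs k1' k2' rev := by
  unfold PySem.List.sorted2
  cases rev <;>
  · simp only [if_true, if_false, Bool.false_eq_true]
    apply pv_foldl_insertBy_congr (Q := fun x => x ∈ xs)
    · intro a b ha hb
      rw [h1 a ha, h1 b hb, h2 a ha, h2 b hb]
    · intro x hx; exact hx
    · intro y hy; cases hy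

-- a loop over range(n) that conditionally rewrites slot i from its old value
theorem pv_foldl_setD {α : Type} (P : Int → Bool) (F : Int → α → α) (dflt : α)
    (xs : List α) (n : Nat) (hn : n ≤ xs.length) :
    (PySem.List.pyRange 0 (n : Int) 1).foldl
        (fun l i => if P i then PySem.List.pySetD l i (F i (PySem.List.pyGetD l i dflt)) else l) xs
      = ((xs.take n).mapIdx (fun k v => if P (k : Int) then F (k : Int) v else v)) ++ xs.drop n := by
  induction n with
  | zero => simp
  | succ n ih =>
    have hn' : n ≤ xs.length := Nat.le_of_succ_le hn
    have hlt : n < xs.length := hn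
    have hcast : ((n + 1 : Nat) : Int) = (n : Int) + 1 := by push_cast; ring
    rw [hcast, PySem.List.pyRange_one_succ_right (by positivity), List.foldl_append]
    rw [ih hn']
    set G : Nat → α → α := fun k v => if P (k : Int) then F (k : Int) v else v with hG
    have hlen : ((xs.take n).mapIdx G).length = n := by
      simp [List.length_mapIdx, List.length_take, Nat.min_eq_left hn']
    have hget : PySem.List.pyGetD ((xs.take n).mapIdx G ++ xs.drop n) (n : Int) dflt = xs[n] := by
      rw [PySem.List.pyGetD_natCast]
      rw [List.getD, List.getElem?_append_right (by omega)]
      rw [hlen, Nat.sub_self]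
      rw [List.getElem?_drop]
      simp [hlt]
    have htake : xs.take (n+1) = xs.take n ++ [xs[n]] := by
      rw [List.take_add_one]
      simp [hlt]
    have hmap : (xs.take (n+1)).mapIdx G = (xs.take n).mapIdx G ++ [G n xs[n]] := by
      rw [htake, List.mapIdx_append]
      simp [List.length_take, Nat.min_eq_left hn']
    have hdrop : xs.drop n = xs[n] :: xs.drop (n+1) := List.drop_eq_getElem_cons hlt
    simp only [List.foldl_cons, List.foldl_nil]
    by_cases hP : P (n : Int)
    · simp only [hP, if_true]
      rw [hget, PySem.List.pySetD_natCast, List.set_append]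
      rw [hlen]
      simp only [lt_irrefl, if_false, Nat.sub_self]
      rw [hdrop]
      simp only [List.set_cons_zero]
      rw [hmap, hG]
      simp [hP]
    · simp only [hP, if_false, Bool.false_eq_true]
      rw [hmap, hG]
      simp only [hP, if_false, Bool.false_eq_true]
      rw [hdrop]
      simp

-- mapIdx over a tabulated list is retabulation
theorem pv_mapIdx_map_range {α β : Type} (g : Nat → α) (F : Nat → α → β) (n : Nat) :
    ((List.range n).map g).mapIdx (fun k v => F k v) = (List.range n).map (fun k => F k (g k)) := by
  apply List.ext_getElem
  · simp
  · intro i h1 h2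
    simp [List.getElem_mapIdx]

theorem pv_mapIdx_const {α β : Type} (f : α → β) (l : List α) :
    l.mapIdx (fun _ v => f v) = l.map f := by
  apply List.ext_getElem
  · simp
  · intro i h1 h2
    simp [List.getElem_mapIdx]

-- tabulating getD over range n is take n
theorem pv_map_range_getD {α : Type} (xs : List α) (dflt : α) (n : Nat) (hn : n ≤ xs.length) :
    (List.range n).map (fun k => xs.getD k dflt) = xs.take n := by
  apply List.ext_getElem
  · simp [Nat.min_eq_left hn]
  · intro i h1 h2
    simp only [List.getElem_map, List.getElem_range, List.getElem_take]
    rw [List.getD_eq_getElem]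

-- A's per-column cell list, counted, is a column count over the first H' rows
theorem pv_count_range (x : String) (d : List (List String)) (H' : Nat) (hH : H' ≤ d.length)
    (j : Int) (hj : 0 ≤ j) :
    ((PySem.List.count ((PySem.List.pyRange 0 (H' : Int) 1).map (fun i =>
        PySem.List.pyGetD (PySem.List.pyGetD d i []) j "")) x : Nat) : Int)
      = pvColCnt x (d.take H') j.toNat := by
  have hj' : j = ((j.toNat : Nat) : Int) := (Int.toNat_of_nonneg hj).symm
  rw [hj']
  rw [PySem.List.pyRange_one]
  simp only [Int.sub_zero, Int.toNat_natCast, List.map_map, Function.comp_def, zero_add,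
    PySem.List.pyGetD_natCast]
  rw [show (fun k => (d.getD k []).getD j.toNat "") = ((fun row => row.getD j.toNat "") ∘ (fun k => d.getD k [])) from rfl,
    ← List.map_map, pv_map_range_getD d [] H' hH]
  rw [PySem.List.count_eq, List.count_eq_countP, List.countP_map]
  unfold pvColCnt
  have : ∀ rows : List (List String), List.countP ((fun y => y == x) ∘ fun row => row.getD j.toNat "") rows = List.countP (fun row => decide (row.getD j.toNat "" = x)) rows := by
    intro rows
    apply List.countP_congr
    intro row _
    simp [Function.comp_def]
  rw [this]

-- painting one column of the first H' rows, as a map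
theorem pv_paintCol_eq (H' : Nat) (idx : Int) (dd : List (List String)) (h : H' ≤ dd.length) :
    (PySem.List.pyRange 0 (H' : Int) 1).foldl (fun dd2 i =>
        PySem.List.pySetD dd2 i (PySem.List.pySetD (PySem.List.pyGetD dd2 i []) idx "#")) dd
      = (dd.take H').map (fun row => PySem.List.pySetD row idx "#") ++ dd.drop H' := by
  have h2 := pv_foldl_setD (fun _ => true) (fun _ row => PySem.List.pySetD row idx "#") [] dd H' h
  simp only [if_true] at h2
  rw [pv_mapIdx_const] at h2
  exact h2

-- the '#'-count of a row after painting cell idx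
theorem pv_cnt_set (row : List String) (idx : Int) (h0 : 0 ≤ idx) (hlt : idx.toNat < row.length) :
    pvCnt (PySem.List.pySetD row idx "#")
      = pvCnt row + (1 - (if row.getD idx.toNat "" = "#" then 1 else 0)) := by
  unfold pvCnt
  rw [PySem.List.pySetD_of_nonneg _ _ h0]
  rw [PySem.List.count_eq, PySem.List.count_eq, List.count_set hlt]
  rw [List.getD_eq_getElem _ _ hlt]
  by_cases hc : row[idx.toNat] = "#"
  · have hpos : 0 < List.count "#" row := by
      rw [List.count_pos_iff]
      rw [← hc]
      exact List.getElem_mem _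
    simp only [hc, beq_iff_eq, if_true, beq_self_eq_true, reduceIte]
    omega
  · simp only [beq_iff_eq, hc, if_false, beq_self_eq_true, reduceIte]
    omega

theorem pv_sum_one_sub (rows : List (List String)) (p : List String → Prop) [DecidablePred p] :
    (rows.map (fun row => (1 : Int) - (if p row then 1 else 0))).sum
      = (rows.length : Int) - (rows.countP (fun row => decide (p row)) : Nat) := by
  induction rows with
  | nil => simp
  | cons r rows ih =>
    simp only [List.map_cons, List.sum_cons, List.countP_cons, List.length_cons, ih]
    by_cases hp : p r <;> simp [hp] <;> push_cast <;> ring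

-- total '#' gain of painting one column
theorem pv_paint_sum (H' W' : Nat) (idx : Int) (dd : List (List String))
    (h : H' ≤ dd.length) (hrows : ∀ row ∈ dd.take H', W' ≤ row.length)
    (h0 : 0 ≤ idx) (hidx : idx < (W' : Int)) :
    ((((dd.take H').map (fun row => PySem.List.pySetD row idx "#") ++ dd.drop H').map pvCnt).sum)
      = ((dd.map pvCnt).sum) + ((H' : Int) - pvColCnt "#" (dd.take H') idx.toNat) := by
  have hlen : (dd.take H').length = H' := by simp [List.length_take, Nat.min_eq_left h]
  have hmc : (dd.take H').map (fun row => pvCnt (PySem.List.pySetD row idx "#"))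
      = (dd.take H').map (fun row => pvCnt row + (1 - (if row.getD idx.toNat "" = "#" then 1 else 0))) := by
    apply List.map_congr_left
    intro row hr
    apply pv_cnt_set row idx h0
    have hW := hrows row hr
    omega
  rw [List.map_append, List.sum_append, List.map_map]
  conv_rhs => rw [← List.take_append_drop H' dd, List.map_append, List.sum_append]
  rw [Function.comp_def, hmc, PySem.List.sum_map_add_int, pv_sum_one_sub, hlen]
  unfold pvColCnt
  rw [List.take_append_drop]
  ring

-- painting a column does not change other columns' counts
theorem pv_paint_other (H' : Nat) (x : String) (idx j : Int) (dd : List (List String))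
    (h : H' ≤ dd.length) (h0 : 0 ≤ idx) (hj0 : 0 ≤ j) (hne : j ≠ idx) :
    pvColCnt x ((((dd.take H').map (fun row => PySem.List.pySetD row idx "#") ++ dd.drop H')).take H') j.toNat
      = pvColCnt x (dd.take H') j.toNat := by
  have hlen : (((dd.take H').map (fun row => PySem.List.pySetD row idx "#"))).length = H' := by
    simp [List.length_take, Nat.min_eq_left h]
  rw [show List.take H' (((dd.take H').map (fun row => PySem.List.pySetD row idx "#")) ++ dd.drop H')
        = ((dd.take H').map (fun row => PySem.List.pySetD row idx "#")) from
      List.take_left' hlen]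
  unfold pvColCnt
  rw [List.countP_map]
  congr 1
  apply List.countP_congr
  intro row _
  simp only [Function.comp_def, PySem.List.pySetD_of_nonneg _ _ h0]
  have hne' : j.toNat ≠ idx.toNat := by omega
  rw [List.getD_eq_getElem?_getD, List.getD_eq_getElem?_getD,
    List.getElem?_set_ne (by omega)]

-- painting a list of distinct columns: total '#' afterwards, arithmetically
theorem pv_paintAll (H' W' : Nat) :
    ∀ (S : List Int) (dd : List (List String)), S.Nodup →
      (∀ s ∈ S, 0 ≤ s ∧ s < (W' : Int)) → H' ≤ dd.length →
      (∀ row ∈ dd.take H', W' ≤ row.length) →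
      ((S.foldl (fun dd2 idx =>
          (PySem.List.pyRange 0 (H' : Int) 1).foldl (fun dd3 i =>
            PySem.List.pySetD dd3 i (PySem.List.pySetD (PySem.List.pyGetD dd3 i []) idx "#")) dd2) dd).map pvCnt).sum
        = ((dd.map pvCnt).sum)
          + (S.map (fun s => (H' : Int) - pvColCnt "#" (dd.take H') s.toNat)).sum := by
  intro S
  induction S with
  | nil => intro dd _ _ _ _; simp
  | cons sidx S ih =>
    intro dd hnd hbd hH hrows
    have hs0 : 0 ≤ sidx := (hbd sidx (by simp)).1
    have hsW : sidx < (W' : Int) := (hbd sidx (by simp)).2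
    simp only [List.foldl_cons]
    rw [pv_paintCol_eq H' sidx dd hH]
    set dd' := (dd.take H').map (fun row => PySem.List.pySetD row sidx "#") ++ dd.drop H' with hdd'
    have hlen' : dd'.length = dd.length := by
      simp [hdd', List.length_take, Nat.min_eq_left hH]
      omega
    have htk : dd'.take H' = (dd.take H').map (fun row => PySem.List.pySetD row sidx "#") := by
      apply List.take_left'
      simp [List.length_take, Nat.min_eq_left hH]
    have hrows' : ∀ row ∈ dd'.take H', W' ≤ row.length := by
      intro row hr
      rw [htk] at hr
      obtain ⟨r, hrmem, hreq⟩ := List.mem_map.1 hr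
      rw [← hreq, PySem.List.length_pySetD]
      exact hrows r hrmem
    have hIH := ih dd' (List.Nodup.of_cons hnd) (fun s hs => hbd s (by simp [hs]))
      (by omega) hrows'
    rw [hIH]
    rw [pv_paint_sum H' W' sidx dd hH hrows hs0 hsW]
    have hmapS : S.map (fun s => (H' : Int) - pvColCnt "#" (dd'.take H') s.toNat)
        = S.map (fun s => (H' : Int) - pvColCnt "#" (dd.take H') s.toNat) := by
      apply List.map_congr_left
      intro s hs
      have hsne : s ≠ sidx := by
        intro hcontr
        exact (List.nodup_cons.1 hnd).1 (hcontr ▸ hs)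
      rw [hdd', pv_paint_other H' "#" sidx s dd hH hs0 (hbd s (by simp [hs])).1 hsne]
    rw [hmapS]
    simp only [List.map_cons, List.sum_cons]
    ring

-- naming the reverse tuple sort of (key j, j) pairs as a sort of the indices
theorem pv_sorted2_pairs (key : Int → Int) (xs : List Int) :
    PySem.List.sorted2 (xs.map (fun j => (key j, j))) (fun p => p.1) (fun p => p.2) true
      = (PySem.List.sorted2 xs key (fun j => j) true).map (fun j => (key j, j)) := by
  rw [pv_sorted2_map]

-- range(0, n) only depends on the clamped length
theorem pv_pyRange_toNat (b : Int) :
    PySem.List.pyRange 0 b 1 = PySem.List.pyRange 0 ((b.toNat : Nat) : Int) 1 := by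
  rw [PySem.List.pyRange_one, PySem.List.pyRange_one]
  congr 2
  omega

-- one row of B's counting pass over the columns
theorem pv_inner_rowB (W' : Nat) (row : List String) (hf df : Nat → Int) :
    (PySem.List.pyRange 0 (W' : Int) 1).foldl (fun (ar : List Int × List Int) j =>
        let c := PySem.List.pyGetD row j ""
        if c = "." then
          (ar.1, PySem.List.pySetD ar.2 j (PySem.List.pyGetD ar.2 j 0 + 1))
        else if c = "#" then
          (PySem.List.pySetD ar.1 j (PySem.List.pyGetD ar.1 j 0 + 1), ar.2)
        else ar) ((List.range W').map hf, (List.range W').map df)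
      = ((List.range W').map (fun k => if row.getD k "" = "#" then hf k + 1 else hf k),
         (List.range W').map (fun k => if row.getD k "" = "." then df k + 1 else df k)) := by
  have hstep : (fun (ar : List Int × List Int) (j : Int) =>
      let c := PySem.List.pyGetD row j ""
      if c = "." then
        (ar.1, PySem.List.pySetD ar.2 j (PySem.List.pyGetD ar.2 j 0 + 1))
      else if c = "#" then
        (PySem.List.pySetD ar.1 j (PySem.List.pyGetD ar.1 j 0 + 1), ar.2)
      else ar)
      = (fun ar j =>
        ((fun l i => if (fun i => decide (PySem.List.pyGetD row i "" = "#")) i then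
            PySem.List.pySetD l i ((fun (_ : Int) (v : Int) => v + 1) i (PySem.List.pyGetD l i 0)) else l) ar.1 j,
         (fun l i => if (fun i => decide (PySem.List.pyGetD row i "" = ".")) i then
            PySem.List.pySetD l i ((fun (_ : Int) (v : Int) => v + 1) i (PySem.List.pyGetD l i 0)) else l) ar.2 j)) := by
    funext ar j
    by_cases h1 : PySem.List.pyGetD row j "" = "."
    · simp [h1]
    · by_cases h2 : PySem.List.pyGetD row j "" = "#"
      · simp [h1, h2]
      · simp [h1, h2]
  rw [hstep, PySem.List.foldl_prod_mk
    (f := fun l i => if (fun i => decide (PySem.List.pyGetD row i "" = "#")) i then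
        PySem.List.pySetD l i ((fun (_ : Int) (v : Int) => v + 1) i (PySem.List.pyGetD l i 0)) else l)
    (g := fun l i => if (fun i => decide (PySem.List.pyGetD row i "" = ".")) i then
        PySem.List.pySetD l i ((fun (_ : Int) (v : Int) => v + 1) i (PySem.List.pyGetD l i 0)) else l)]
  rw [pv_foldl_setD (fun i => decide (PySem.List.pyGetD row i "" = "#"))
        (fun _ v => v + 1) 0 _ W' (by simp),
      pv_foldl_setD (fun i => decide (PySem.List.pyGetD row i "" = "."))
        (fun _ v => v + 1) 0 _ W' (by simp)]
  rw [List.take_of_length_le (by simp), List.drop_of_length_le (by simp),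
    List.take_of_length_le (by simp), List.drop_of_length_le (by simp),
    List.append_nil, List.append_nil]
  rw [pv_mapIdx_map_range, pv_mapIdx_map_range]
  refine Prod.ext ?_ ?_ <;> simp only <;>
  · apply List.map_congr_left
    intro k hk
    simp [PySem.List.pyGetD_natCast]

-- B's counting pass over a list of rows, starting from tabulated tallies
theorem pv_scan_rowsB (W' : Nat) :
    ∀ (rows : List (List String)) (hf df : Nat → Int),
      rows.foldl (fun (st : List Int × List Int) row =>
          (PySem.List.pyRange 0 (W' : Int) 1).foldl (fun (ar : List Int × List Int) j =>
            let c := PySem.List.pyGetD row j ""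
            if c = "." then
              (ar.1, PySem.List.pySetD ar.2 j (PySem.List.pyGetD ar.2 j 0 + 1))
            else if c = "#" then
              (PySem.List.pySetD ar.1 j (PySem.List.pyGetD ar.1 j 0 + 1), ar.2)
            else ar) st)
        ((List.range W').map hf, (List.range W').map df)
      = ((List.range W').map (fun j => hf j + pvColCnt "#" rows j),
         (List.range W').map (fun j => df j + pvColCnt "." rows j)) := by
  intro rows
  induction rows with
  | nil =>
    intro hf df
    simp [pvColCnt]
  | cons row rest ih =>
    intro hf df
    rw [List.foldl_cons, pv_inner_rowB, ih]
    refine Prod.ext ?_ ?_ <;> simp only <;>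
    · apply List.map_congr_left
      intro k _
      unfold pvColCnt
      rw [List.countP_cons]
      simp only [List.getD_eq_getElem?_getD, decide_eq_true_eq]
      push_cast
      split_ifs <;> ring

-- the descending (dot-count, index) order of the columns
def pvOrd (d : List (List String)) (H' W' : Nat) : List Int :=
  PySem.List.sorted2 (PySem.List.pyRange 0 (W' : Nat) 1)
    (fun j => pvColCnt "." (d.take H') j.toNat) (fun j => j) true

theorem pv_ord_length (d : List (List String)) (H' W' : Nat) : (pvOrd d H' W').length = W' := by
  unfold pvOrd
  rw [(PySem.List.sorted2_perm _ _ _ _).length_eq]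
  simp [PySem.List.length_pyRange_one]

theorem pv_ord_nodup (d : List (List String)) (H' W' : Nat) : (pvOrd d H' W').Nodup := by
  unfold pvOrd
  rw [(PySem.List.sorted2_perm _ _ _ _).nodup_iff]
  exact PySem.List.nodup_pyRange_one 0 (W' : Int)

theorem pv_ord_mem (d : List (List String)) (H' W' : Nat) (s : Int) (hs : s ∈ pvOrd d H' W') :
    0 ≤ s ∧ s < (W' : Int) := by
  unfold pvOrd at hs
  have := (PySem.List.sorted2_perm _ _ _ _).subset hs
  exact (PySem.List.mem_pyRange_one.1 this)

theorem pv_A_value (H' W' r' : Nat) (d : List (List String))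
    (hrW : r' ≤ W') (hHd : H' ≤ d.length)
    (hrows : ∀ row ∈ d.take H', W' ≤ row.length) :
    paint_row (H' : Int) (W' : Int) d (r' : Int)
      = (d.map pvCnt).sum
        + (((pvOrd d H' W').take r').map
            (fun s => (H' : Int) - pvColCnt "#" (d.take H') s.toNat)).sum := by
  unfold paint_row
  simp only []
  have hcol : List.map (fun j => (((PySem.List.count
          (List.map (fun i => PySem.List.pyGetD (PySem.List.pyGetD d i []) j "")
            (PySem.List.pyRange 0 (H' : Int) 1)) "." : Nat) : Int), j))
        (PySem.List.pyRange 0 (W' : Int) 1)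
      = List.map (fun j => (pvColCnt "." (d.take H') j.toNat, j))
        (PySem.List.pyRange 0 (W' : Int) 1) := by
    apply List.map_congr_left
    intro j hj
    have hj0 : 0 ≤ j := (PySem.List.mem_pyRange_one.1 hj).1
    rw [pv_count_range "." d H' hHd j hj0]
  rw [hcol]
  rw [pv_sorted2_pairs (fun j => pvColCnt "." (d.take H') j.toNat) (PySem.List.pyRange 0 (W' : Int) 1)]
  rw [show PySem.List.sorted2 (PySem.List.pyRange 0 (W' : Int) 1)
        (fun j => pvColCnt "." (d.take H') j.toNat) (fun j => j) true = pvOrd d H' W' from rfl]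
  rw [show PySem.List.pyRange 0 (r' : Int) 1 = List.map (Nat.cast : Nat → Int) (List.range r') by
    apply List.ext_getElem
    · simp [PySem.List.length_pyRange_one]
    · intro i h1 h2
      simp [PySem.List.getElem_pyRange_one]]
  rw [List.foldl_map]
  rw [← List.foldl_map
    (f := fun k : Nat => (PySem.List.pyGetD
        ((pvOrd d H' W').map (fun j => (pvColCnt "." (d.take H') j.toNat, j)))
        (k : Int) ((0 : Int), (0 : Int))).2)
    (g := fun dd idx => List.foldl (fun dd2 i =>
        PySem.List.pySetD dd2 i (PySem.List.pySetD (PySem.List.pyGetD dd2 i []) idx "#"))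
        dd (PySem.List.pyRange 0 (H' : Int) 1))]
  have hS : (List.range r').map (fun k : Nat => (PySem.List.pyGetD
        ((pvOrd d H' W').map (fun j => (pvColCnt "." (d.take H') j.toNat, j)))
        (k : Int) ((0 : Int), (0 : Int))).2)
      = (pvOrd d H' W').take r' := by
    apply List.ext_getElem
    · simp [pv_ord_length, Nat.min_eq_left hrW]
    · intro i h1 h2
      simp only [List.getElem_map, List.getElem_range, List.getElem_take,
        PySem.List.pyGetD_natCast]
      have hiW : i < ((pvOrd d H' W').map (fun j => (pvColCnt "." (d.take H') j.toNat, j))).length := by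
        simp only [List.length_map, pv_ord_length]
        simp only [List.length_map, List.length_range] at h1
        omega
      rw [List.getD_eq_getElem _ _ hiW, List.getElem_map]
  rw [hS]
  rw [show (fun l : List String => ((PySem.List.count l "#" : Nat) : Int)) = pvCnt from rfl]
  rw [pv_paintAll H' W' ((pvOrd d H' W').take r') d
    ((pv_ord_nodup d H' W').sublist (List.take_sublist _ _))
    (fun s hs => pv_ord_mem d H' W' s (List.mem_of_mem_take hs))
    hHd hrows]

theorem pv_A_value_int (Hn Wn R : Int) (d : List (List String))
    (hH0 : 0 ≤ Hn) (hR0 : 0 ≤ R) (hRW : R ≤ max Wn 0)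
    (hgrid : 0 < Hn → 0 < Wn →
      (Hn ≤ (d.length : Int) ∧ ∀ row ∈ d.take Hn.toNat, Wn ≤ (row.length : Int))) :
    paint_row Hn Wn d R
      = (d.map pvCnt).sum
        + (((pvOrd d Hn.toNat Wn.toNat).take R.toNat).map
            (fun s => ((Hn.toNat : Nat) : Int) - pvColCnt "#" (d.take Hn.toNat) s.toNat)).sum := by
  rcases le_or_gt Wn 0 with hW | hW
  · have hR : R = 0 := by
      have := max_eq_right hW
      omega
    unfold paint_row
    simp only []
    rw [hR]
    rw [PySem.List.pyRange_one_eq_nil hW, PySem.List.pyRange_one_eq_nil (le_refl 0)]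
    simp only [List.map_nil, List.foldl_nil, Int.toNat_zero, List.take_zero,
      List.sum_nil, add_zero]
    rfl
  · have hAeq : paint_row Hn ((Wn.toNat : Nat) : Int) d ((R.toNat : Nat) : Int)
        = paint_row ((Hn.toNat : Nat) : Int) ((Wn.toNat : Nat) : Int) d ((R.toNat : Nat) : Int) := by
      unfold paint_row
      rw [pv_pyRange_toNat Hn]
    have h1 : Wn = ((Wn.toNat : Nat) : Int) := (Int.toNat_of_nonneg (by omega)).symm
    have h2 : R = ((R.toNat : Nat) : Int) := (Int.toNat_of_nonneg hR0).symm
    rw [show paint_row Hn Wn d R = paint_row Hn ((Wn.toNat : Nat) : Int) d ((R.toNat : Nat) : Int) by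
      rw [← h1, ← h2]]
    rw [hAeq]
    have hmax : max Wn 0 = Wn := max_eq_left (by omega)
    apply pv_A_value Hn.toNat Wn.toNat R.toNat d (by omega)
    · rcases le_or_gt Hn 0 with hH | hH
      · omega
      · have := (hgrid hH hW).1
        omega
    · intro row hr
      rcases le_or_gt Hn 0 with hH | hH
      · rw [show Hn.toNat = 0 by omega] at hr
        simp at hr
      · have := (hgrid hH hW).2 row hr
        omega

theorem pv_B_value (Hn Wn R : Int) (d : List (List String)) (hH0 : 0 ≤ Hn)
    (hR0 : 0 ≤ R) (hRW : R ≤ max Wn 0) :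
    paint_row_alt Hn Wn d R
      = (d.map pvCnt).sum
        + (((pvOrd d Hn.toNat Wn.toNat).take R.toNat).map
            (fun s => Hn - pvColCnt "#" (d.take Hn.toNat) s.toNat)).sum := by
  unfold paint_row_alt
  simp only []
  rw [PySem.List.slice_to d hH0]
  rw [pv_pyRange_toNat Wn]
  rw [show PySem.List.pyRepeat [(0 : Int)] Wn = (List.range Wn.toNat).map (fun _ => (0 : Int)) by
    rw [PySem.List.pyRepeat_singleton]
    rw [List.map_const']
    simp]
  rw [pv_scan_rowsB Wn.toNat (d.take Hn.toNat) (fun _ => (0 : Int)) (fun _ => (0 : Int))]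
  simp only [zero_add]
  have hkey : ∀ (g : Nat → Int), ∀ j ∈ PySem.List.pyRange 0 ((Wn.toNat : Nat) : Int) 1,
      PySem.List.pyGetD ((List.range Wn.toNat).map g) j 0 = g j.toNat := by
    intro g j hj
    obtain ⟨hj0, hjW⟩ := PySem.List.mem_pyRange_one.1 hj
    rw [show j = ((j.toNat : Nat) : Int) from (Int.toNat_of_nonneg hj0).symm,
      PySem.List.pyGetD_natCast]
    rw [List.getD_eq_getElem _ _ (by simp; omega), List.getElem_map, List.getElem_range]
    rw [Int.toNat_natCast]
  rw [show PySem.List.sorted2 (PySem.List.pyRange 0 ((Wn.toNat : Nat) : Int) 1)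
        (fun j => PySem.List.pyGetD ((List.range Wn.toNat).map
          (fun j => pvColCnt "." (d.take Hn.toNat) j)) j 0)
        (fun j => j) true = pvOrd d Hn.toNat Wn.toNat from
    pv_sorted2_congr _ _ _ _ _ true
      (hkey (fun j => pvColCnt "." (d.take Hn.toNat) j)) (fun x _ => rfl)]
  -- the gain loop over range(remaining_steps), as a sum over the first R.toNat columns
  rw [show PySem.List.pyRange 0 R 1 = List.map (Nat.cast : Nat → Int) (List.range R.toNat) by
    apply List.ext_getElem
    · simp [PySem.List.length_pyRange_one]
    · intro i h1 h2
      simp [PySem.List.getElem_pyRange_one]]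
  rw [List.foldl_map, PySem.List.foldl_add]
  rw [show (fun row : List String => ((PySem.List.count row "#" : Nat) : Int)) = pvCnt from rfl]
  rw [zero_add]
  congr 1
  rw [show ((pvOrd d Hn.toNat Wn.toNat).take R.toNat).map
        (fun s => Hn - pvColCnt "#" (d.take Hn.toNat) s.toNat)
      = (List.range R.toNat).map (fun k =>
          Hn - pvColCnt "#" (d.take Hn.toNat)
            ((pvOrd d Hn.toNat Wn.toNat).getD k 0).toNat) by
    apply List.ext_getElem
    · simp [pv_ord_length]
      omega
    · intro i h1 h2
      simp only [List.getElem_map, List.getElem_range, List.getElem_take]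
      have hiW : i < (pvOrd d Hn.toNat Wn.toNat).length := by
        simp only [List.length_map, List.length_take, pv_ord_length, lt_min_iff] at h1 ⊢
        omega
      rw [List.getD_eq_getElem _ _ hiW]]
  symm
  refine congrArg List.sum ?_
  apply List.map_congr_left
  intro k hk
  have hkR : k < R.toNat := List.mem_range.1 hk
  have hkW : k < Wn.toNat := by omega
  rw [show PySem.List.pyGetD (pvOrd d Hn.toNat Wn.toNat) ((k : Nat) : Int) 0
        = (pvOrd d Hn.toNat Wn.toNat).getD k 0 from PySem.List.pyGetD_natCast _ _ _]
  have hget : (pvOrd d Hn.toNat Wn.toNat).getD k 0 ∈ pvOrd d Hn.toNat Wn.toNat := by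
    rw [List.getD_eq_getElem _ _ (by rw [pv_ord_length]; omega)]
    exact List.getElem_mem _
  obtain ⟨hj0, hjW⟩ := pv_ord_mem d Hn.toNat Wn.toNat _ hget
  rw [hkey (fun j => pvColCnt "#" (d.take Hn.toNat) j) _
    (PySem.List.mem_pyRange_one.2 ⟨hj0, hjW⟩)]

-- when no column is ever painted (remaining_steps ≤ 0), B is the plain '#' total (any H)
theorem pv_B_total (Hn Wn R : Int) (d : List (List String)) (hR : R ≤ 0) :
    paint_row_alt Hn Wn d R = (d.map pvCnt).sum := by
  unfold paint_row_alt
  simp only []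
  rw [PySem.List.pyRange_one_eq_nil hR, List.foldl_nil]
  rw [add_zero]
  rfl

-- when no column is ever painted, A is the plain '#' total (any H)
theorem pv_A_total (Hn Wn R : Int) (d : List (List String)) (hR : R ≤ 0) :
    paint_row Hn Wn d R = (d.map pvCnt).sum := by
  unfold paint_row
  simp only []
  rw [PySem.List.pyRange_one_eq_nil hR, List.foldl_nil]
  rfl

-- ===== VERDICT (by name: the statement is the Claim_ definition above) =====
theorem paint_row_spec : Claim_equal_paint_row := by
  intro H W d r _ hpre
  obtain ⟨hHc, hrmax, hgrid⟩ := hpre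
  show paint_row H W d r = paint_row_alt H W d r
  rcases le_or_gt r 0 with hr0 | hr0
  · -- no column is ever painted: both sides are the plain '#' total
    rw [pv_A_total H W r d hr0, pv_B_total H W r d hr0]
  · have hH0 : 0 ≤ H := by
      rcases hHc with h | h
      · exact h
      · omega
    rw [pv_A_value_int H W r d hH0 (by omega) hrmax hgrid,
      pv_B_value H W r d hH0 (by omega) hrmax]
    congr 1
    refine congrArg List.sum (List.map_congr_left ?_)
    intro s hs
    rw [Int.toNat_of_nonneg hH0]
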